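-- pv_equiv track=rewrite | github.com/whealy11/carbon_credit_simulation | first_pass.py | _allocate_from_sorted
-- ===== SOURCE A (Python) =====
-- def _allocate_from_sorted(bids_sorted, total_credits):
--     winners = []
--     idx = 0
--     while total_credits > 0 and idx < len(bids_sorted):
--         price, ag, q = bids_sorted[idx]
--         take = q if q <= total_credits else total_credits
--         winners.append((price, ag, take))
--         total_credits -= take
--         idx += 1
--     return winners, bids_sorted[idx:]
-- ===== SOURCE B (Python) =====
-- def _allocate_from_sorted(bids_sorted, total_credits):
--     # pass 1: prefix sums of the bid quantities
--     sums = []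
--     s = 0
--     for _, _, q in bids_sorted:
--         s += q
--         sums.append(s)
--     if total_credits <= 0:
--         return [], bids_sorted
--     # pass 2: first index whose cumulative quantity covers the credits
--     n = len(bids_sorted)
--     i = n
--     for k in range(n):
--         if sums[k] >= total_credits:
--             i = k
--             break
--     if i == n:
--         return bids_sorted, []
--     # pass 3: assemble the answer by slicing around the split bid
--     p, a, q = bids_sorted[i]
--     return bids_sorted[:i] + [(p, a, total_credits - (sums[i] - q))], bids_sorted[i + 1:]
-- ===== Notes on version B (the rewrite author's own statement) =====
-- stated objective: alternative
-- what changed: Replaces the single destructive append-and-decrement while-loop with three staged passes: build the prefix-sum table of quantities, locate the first index whose cumulative quantity reaches the credits, then assemble the result by slicing around that split bid.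
import Mathlib
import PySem

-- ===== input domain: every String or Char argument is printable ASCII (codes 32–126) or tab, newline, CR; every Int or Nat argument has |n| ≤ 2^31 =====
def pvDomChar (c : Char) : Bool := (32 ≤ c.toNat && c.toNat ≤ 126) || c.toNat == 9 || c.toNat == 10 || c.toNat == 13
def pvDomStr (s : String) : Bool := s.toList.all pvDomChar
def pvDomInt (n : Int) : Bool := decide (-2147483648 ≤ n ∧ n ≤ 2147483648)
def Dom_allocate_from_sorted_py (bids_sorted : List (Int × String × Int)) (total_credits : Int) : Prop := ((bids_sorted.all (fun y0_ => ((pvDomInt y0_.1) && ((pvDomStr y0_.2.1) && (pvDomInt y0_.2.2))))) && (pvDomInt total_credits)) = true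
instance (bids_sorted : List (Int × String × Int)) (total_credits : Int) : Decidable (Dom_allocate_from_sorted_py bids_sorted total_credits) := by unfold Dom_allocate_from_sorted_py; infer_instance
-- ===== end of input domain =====

-- B replaces A's destructive append-and-decrement while-loop with three staged
-- passes: a prefix-sum table, a search for the split index, and slice assembly
-- (objective: alternative decomposition; same O(n) cost).

-- ===== PORT A =====
-- A's while-loop: recursion on the not-yet-visited suffix, carrying the winners
-- accumulator and the remaining credits; 'bids_sorted[idx:]' is the remaining suffix.
def pvLoopA (rest : List (Int × String × Int)) (total_credits : Int)
    (winners : List (Int × String × Int)) :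
    (List (Int × String × Int)) × (List (Int × String × Int)) :=
  match rest with
  | [] => (winners, [])
  | (price, ag, q) :: rest' =>
      if total_credits > 0 then
        let take := if q ≤ total_credits then q else total_credits
        pvLoopA rest' (total_credits - take) (winners ++ [(price, ag, take)])
      else
        (winners, rest)

def allocate_from_sorted_py (bids_sorted : List (Int × String × Int)) (total_credits : Int) : (List (Int × String × Int)) × (List (Int × String × Int)) :=
  pvLoopA bids_sorted total_credits []

-- ===== PORT B =====
-- Source B pass 1: the for-loop appending the running sum s + q.
def pvSums : List (Int × String × Int) → Int → List Int
  | [], _ => []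
  | (_, _, q) :: rest, s => (s + q) :: pvSums rest (s + q)

-- Source B pass 2: 'for k in range(n): if sums[k] >= tc: i = k; break' with default n.
def pvFirstIdx : List Int → Int → Nat
  | [], _ => 0
  | s :: rest, tc => if s ≥ tc then 0 else pvFirstIdx rest tc + 1

-- Source B pass 3: the slices bids_sorted[:i] / [i+1:] are take/drop (i in range, so
-- the Python index accesses sums[i], bids_sorted[i] are total; getD is exact here).
def allocate_from_sorted_py_alt (bids_sorted : List (Int × String × Int)) (total_credits : Int) : (List (Int × String × Int)) × (List (Int × String × Int)) :=
  let sums := pvSums bids_sorted 0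
  if total_credits ≤ 0 then ([], bids_sorted)
  else
    let i := pvFirstIdx sums total_credits
    if i = bids_sorted.length then (bids_sorted, [])
    else
      let b := bids_sorted.getD i (0, "", 0)
      (bids_sorted.take i ++ [(b.1, b.2.1, total_credits - (sums.getD i 0 - b.2.2))],
       bids_sorted.drop (i + 1))

-- ===== PRECONDITION & SPEC =====
def Spec_allocate_from_sorted_py (bids_sorted : List (Int × String × Int)) (total_credits : Int) (out : (List (Int × String × Int)) × (List (Int × String × Int))) : Prop := out = allocate_from_sorted_py_alt bids_sorted total_credits
instance (bids_sorted : List (Int × String × Int)) (total_credits : Int) (out : (List (Int × String × Int)) × (List (Int × String × Int))) : Decidable (Spec_allocate_from_sorted_py bids_sorted total_credits out) := by unfold Spec_allocate_from_sorted_py; infer_instance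

-- ===== CLAIM (what is proved, stated in full; the proofs are below) =====
def Claim_equal_allocate_from_sorted_py : Prop := ∀ (bids_sorted : List (Int × String × Int)) (total_credits : Int), Dom_allocate_from_sorted_py bids_sorted total_credits → Spec_allocate_from_sorted_py bids_sorted total_credits (allocate_from_sorted_py bids_sorted total_credits)

-- ===== LEMMAS AND PROOFS =====

-- Proof-only reference function: the greedy allocation on the remaining credits.
def pvGreedy : List (Int × String × Int) → Int → (List (Int × String × Int)) × (List (Int × String × Int))
  | [], _ => ([], [])
  | (p, a, q) :: rest, tc =>
      if tc ≤ q then ([(p, a, tc)], rest)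
      else
        let r := pvGreedy rest (tc - q)
        ((p, a, q) :: r.1, r.2)

theorem pvLoopA_eq_greedy (l : List (Int × String × Int)) (tc : Int) (acc : List (Int × String × Int))
    (htc : 0 < tc) :
    pvLoopA l tc acc = (acc ++ (pvGreedy l tc).1, (pvGreedy l tc).2) := by
  induction l generalizing tc acc with
  | nil => simp [pvLoopA, pvGreedy]
  | cons hd tl ih =>
      obtain ⟨p, a, q⟩ := hd
      by_cases hq : tc ≤ q
      · have htake : (if q ≤ tc then q else tc) = tc := by
          split_ifs with h
          · omega
          · rfl
        simp only [pvLoopA, pvGreedy, if_pos htc, htake, if_pos hq]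
        have : tc - tc = 0 := by omega
        rw [this]
        cases tl with
        | nil => simp [pvLoopA]
        | cons x xs => simp [pvLoopA]
      · have hq' : q ≤ tc := by omega
        simp only [pvLoopA, pvGreedy, if_pos htc, if_pos hq', if_neg hq]
        rw [ih (tc - q) _ (by omega)]
        simp

-- B's staged computation for tc > 0, generalised over the running prefix sum s.
def pvCoreB (l : List (Int × String × Int)) (tc s : Int) :
    (List (Int × String × Int)) × (List (Int × String × Int)) :=
  let sums := pvSums l s
  let i := pvFirstIdx sums tc
  if i = l.length then (l, [])
  else
    let b := l.getD i (0, "", 0)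
    (l.take i ++ [(b.1, b.2.1, tc - (sums.getD i 0 - b.2.2))], l.drop (i + 1))

theorem pvCoreB_eq_greedy (l : List (Int × String × Int)) (tc s : Int) (h : s < tc) :
    pvCoreB l tc s = pvGreedy l (tc - s) := by
  induction l generalizing s with
  | nil => simp [pvCoreB, pvSums, pvFirstIdx, pvGreedy]
  | cons hd tl ih =>
      obtain ⟨p, a, q⟩ := hd
      by_cases hge : s + q ≥ tc
      · have hq : tc - s ≤ q := by omega
        simp [pvCoreB, pvSums, pvFirstIdx, pvGreedy, if_pos hge]
        omega
      · have hq : ¬ tc - s ≤ q := by omega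
        have ihe := ih (s + q) (by omega)
        simp only [pvCoreB] at ihe
        simp only [pvCoreB, pvSums, pvFirstIdx, if_neg hge, pvGreedy, if_neg hq,
          List.length_cons, Nat.add_right_cancel_iff, List.getD_cons_succ,
          List.take_succ_cons, List.drop_succ_cons]
        split_ifs at ihe ⊢ with h1
        all_goals
          have e : tc - s - q = tc - (s + q) := by ring
          rw [e, ← ihe]
          try simp

-- ===== VERDICT (by name: the statement is the Claim_ definition above) =====
theorem allocate_from_sorted_py_spec : Claim_equal_allocate_from_sorted_py := by
  intro bids tc _
  unfold Spec_allocate_from_sorted_py allocate_from_sorted_py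
  by_cases htc : tc ≤ 0
  · cases bids with
    | nil => simp [pvLoopA, allocate_from_sorted_py_alt, htc]
    | cons hd tl =>
        obtain ⟨p, a, q⟩ := hd
        simp [pvLoopA, allocate_from_sorted_py_alt, htc, show ¬ tc > 0 by omega]
  · have h := pvCoreB_eq_greedy bids tc 0 (by omega)
    have h0 : tc - (0 : Int) = tc := by ring
    rw [h0] at h
    rw [pvLoopA_eq_greedy bids tc [] (by omega), List.nil_append, ← h]
    simp [allocate_from_sorted_py_alt, pvCoreB, htc]
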